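-- pv_equiv track=rewrite | github.com/timus69/Amazon-SDE-Intern-OA | SearchWord_to_ResultWord.py | findMinChars
-- ===== SOURCE A (Python) =====
-- def findMinChars(searchWord,resultWord):
--     x = 0
--     y = 0
--     # l = []
--     while x != len(searchWord) and y!=len(resultWord):
--         if searchWord[x] == resultWord[y]:
--             # l.append(searchWord[x])
--             x+=1
--             y+=1
--         else:
--             x+=1
--     # return len(resultWord)- len(l)
--     return len(resultWord)- y
-- ===== SOURCE B (Python) =====
-- def findMinChars(searchWord, resultWord):
--     def is_subseq(pattern, text):
--         it = iter(text)
--         return all(c in it for c in pattern)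
--     lo, hi = 0, len(resultWord)
--     while lo < hi:
--         mid = (lo + hi + 1) // 2
--         if is_subseq(resultWord[:mid], searchWord):
--             lo = mid
--         else:
--             hi = mid - 1
--     return len(resultWord) - lo
-- ===== Notes on version B (the rewrite author's own statement) =====
-- stated objective: alternative
-- what changed: Replaces A's single greedy two-pointer scan with a binary search over the matched prefix length: a monotone predicate 'resultWord[:k] is a subsequence of searchWord' is tested independently at each probe, so the answer is located in O(log m) subsequence checks instead of one coupled scan.
import Mathlib
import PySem

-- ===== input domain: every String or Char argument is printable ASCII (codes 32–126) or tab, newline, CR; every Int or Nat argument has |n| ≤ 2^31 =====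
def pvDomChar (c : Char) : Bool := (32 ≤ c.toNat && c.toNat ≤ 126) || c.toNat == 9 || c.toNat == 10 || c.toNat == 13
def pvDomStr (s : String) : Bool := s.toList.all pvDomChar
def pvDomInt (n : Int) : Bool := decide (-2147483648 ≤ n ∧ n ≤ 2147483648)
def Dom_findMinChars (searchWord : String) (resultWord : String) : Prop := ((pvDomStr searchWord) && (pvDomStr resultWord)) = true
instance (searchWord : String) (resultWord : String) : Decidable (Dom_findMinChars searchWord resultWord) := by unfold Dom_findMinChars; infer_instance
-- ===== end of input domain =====

-- B replaces A's single greedy two-pointer scan by a binary search over the matched prefix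
-- length, testing each probe with an independent subsequence check (objective: alternative).

-- ===== PORT A =====
-- A's while loop: x walks searchWord, y walks resultWord; stops when either index reaches its
-- end; returns len(resultWord) - y.  We recurse on the suffixes of the two strings (x and y are
-- exactly the positions reached), returning the final y.
def aLoop : List Char → List Char → Nat
  | [], _ => 0
  | _ :: _, [] => 0
  | a :: s, b :: r => if a = b then aLoop s r + 1 else aLoop s (b :: r)

def findMinChars (searchWord : String) (resultWord : String) : Int :=
  (resultWord.toList.length : Int) - (aLoop searchWord.toList resultWord.toList : Int)

-- ===== PORT B =====
-- `c in it` on an iterator: consume the remaining text until c is found; some rest = found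
-- (iterator now past that occurrence), none = iterator exhausted without finding c.
def consume : List Char → Char → Option (List Char)
  | [], _ => none
  | a :: s, c => if a = c then some s else consume s c

-- is_subseq(pattern, text): all(c in it for c in pattern) over a lazy iterator of text.
def isSubseq : List Char → List Char → Bool
  | [], _ => true
  | c :: ps, t =>
    match consume t c with
    | some t' => isSubseq ps t'
    | none => false

-- the binary-search while loop of Source B: lo/hi as in the Python, pred mid = is_subseq(r[:mid], s).
def bsearch (pred : Nat → Bool) (lo hi : Nat) : Nat :=
  if h : lo < hi then
    let mid := (lo + hi + 1) / 2
    if pred mid then bsearch pred mid hi else bsearch pred lo (mid - 1)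
  else lo
termination_by hi - lo
decreasing_by all_goals omega

-- resultWord[:mid] with 0 ≤ mid: exactly List.take mid on the character list.
def findMinChars_alt (searchWord : String) (resultWord : String) : Int :=
  let r := resultWord.toList
  let lo := bsearch (fun mid => isSubseq (r.take mid) searchWord.toList) 0 r.length
  (r.length : Int) - (lo : Int)

-- ===== PRECONDITION & SPEC =====
def Spec_findMinChars (searchWord : String) (resultWord : String) (out : Int) : Prop := out = findMinChars_alt searchWord resultWord
instance (searchWord : String) (resultWord : String) (out : Int) : Decidable (Spec_findMinChars searchWord resultWord out) := by unfold Spec_findMinChars; infer_instance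

-- ===== CLAIM (what is proved, stated in full; the proofs are below) =====
def Claim_equal_findMinChars : Prop := ∀ (searchWord : String) (resultWord : String), Dom_findMinChars searchWord resultWord → Spec_findMinChars searchWord resultWord (findMinChars searchWord resultWord)

-- ===== LEMMAS AND PROOFS =====

-- is_subseq decides the sublist (subsequence) relation.
theorem isSubseq_iff : ∀ (t p : List Char), isSubseq p t = true ↔ List.Sublist p t := by
  intro t
  induction t with
  | nil =>
    intro p
    cases p with
    | nil => simp [isSubseq]
    | cons c ps => simp [isSubseq, consume]
  | cons a ts ih =>
    intro p
    cases p with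
    | nil => simp [isSubseq]
    | cons c ps =>
      by_cases h : a = c
      · subst h
        have hstep : isSubseq (a :: ps) (a :: ts) = isSubseq ps ts := by
          simp [isSubseq, consume]
        rw [hstep, ih ps]
        exact (List.cons_sublist_cons).symm
      · have hstep : isSubseq (c :: ps) (a :: ts) = isSubseq (c :: ps) ts := by
          simp [isSubseq, consume, h]
        rw [hstep, ih (c :: ps)]
        constructor
        · exact fun hs => hs.cons a
        · intro hs
          cases hs with
          | cons _ hs' => exact hs'
          | cons₂ _ hs' => exact absurd rfl h

theorem aLoop_le : ∀ (s r : List Char), aLoop s r ≤ r.length := by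
  intro s
  induction s with
  | nil => intro r; cases r <;> simp [aLoop]
  | cons a s ih =>
    intro r
    cases r with
    | nil => simp [aLoop]
    | cons b r =>
      by_cases h : a = b
      · simpa [aLoop, h] using ih r
      · exact le_trans (by simpa [aLoop, h] using ih (b :: r)) (le_refl _)

-- the greedy scan achieves its count: the prefix of length aLoop s r is a subsequence of s.
theorem aLoop_achieves : ∀ (s r : List Char), List.Sublist (r.take (aLoop s r)) s := by
  intro s
  induction s with
  | nil => intro r; cases r <;> simp [aLoop]
  | cons a s ih =>
    intro r
    cases r with
    | nil => simp [aLoop]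
    | cons b r =>
      by_cases h : a = b
      · subst h
        simpa [aLoop, List.take] using List.Sublist.cons₂ a (ih r)
      · simpa [aLoop, h] using (ih (b :: r)).cons a

-- the greedy scan is maximal among prefixes of length ≤ |r|.
theorem aLoop_max : ∀ (s r : List Char) (k : Nat), k ≤ r.length → List.Sublist (r.take k) s → k ≤ aLoop s r := by
  intro s
  induction s with
  | nil =>
    intro r k hk hs
    cases r with
    | nil => simpa [aLoop] using (by simpa using hk)
    | cons b r =>
      cases k with
      | zero => simp [aLoop]
      | succ k' => simp [List.take] at hs
  | cons a s ih =>
    intro r k hk hs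
    cases r with
    | nil =>
      simp only [List.length_nil, Nat.le_zero] at hk
      simp [aLoop, hk]
    | cons b r =>
      cases k with
      | zero => exact Nat.zero_le _
      | succ k' =>
        simp only [List.take] at hs
        by_cases h : a = b
        · subst h
          have htail : List.Sublist (List.take k' r) s := by
            cases hs with
            | cons _ hs' => exact (List.sublist_cons_self _ _).trans hs'
            | cons₂ _ hs' => exact hs'
          have := ih r k' (by simpa using hk) htail
          simpa [aLoop] using Nat.succ_le_succ this
        · have hrest : List.Sublist (b :: List.take k' r) s := by
            cases hs with
            | cons _ hs' => exact hs'
            | cons₂ _ hs' => exact absurd rfl h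
          have := ih (b :: r) (k' + 1) (by simpa using hk) (by simpa [List.take] using hrest)
          simpa [aLoop, h] using this

-- prefix monotonicity: a shorter prefix of a sublist prefix is still a sublist.
theorem take_sublist_of_le {r s : List Char} {k y : Nat} (hky : k ≤ y)
    (h : List.Sublist (r.take y) s) : List.Sublist (r.take k) s := by
  have : r.take k = (r.take y).take k := by
    rw [List.take_take, Nat.min_eq_left hky]
  rw [this]
  exact (List.take_sublist _ _).trans h

-- the binary search finds y when pred is the monotone predicate k ≤ y on (lo, hi].
theorem bsearch_eq (p : Nat → Bool) (y : Nat) :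
    ∀ (n lo hi : Nat), hi - lo ≤ n → lo ≤ y → y ≤ hi →
      (∀ k, lo < k → k ≤ hi → (p k = true ↔ k ≤ y)) → bsearch p lo hi = y := by
  intro n
  induction n with
  | zero =>
    intro lo hi hn h1 h2 _
    rw [bsearch]
    have : ¬ lo < hi := by omega
    simp [this]; omega
  | succ m ih =>
    intro lo hi hn h1 h2 hp
    rw [bsearch]
    by_cases h : lo < hi
    · simp only [dif_pos h]
      have hmid1 : lo < (lo + hi + 1) / 2 := by omega
      have hmid2 : (lo + hi + 1) / 2 ≤ hi := by omega
      by_cases hpm : p ((lo + hi + 1) / 2) = true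
      · have hy : (lo + hi + 1) / 2 ≤ y := (hp _ hmid1 hmid2).mp hpm
        simp only [hpm, if_true]
        exact ih _ hi (by omega) hy h2 (fun k hk1 hk2 => hp k (by omega) hk2)
      · have hy : ¬ ((lo + hi + 1) / 2 ≤ y) := fun hle => hpm ((hp _ hmid1 hmid2).mpr hle)
        simp only [hpm]
        exact ih lo _ (by omega) h1 (by omega)
          (fun k hk1 hk2 => hp k hk1 (by omega))
    · simp only [dif_neg h]; omega

-- ===== VERDICT (by name: the statement is the Claim_ definition above) =====
theorem findMinChars_spec : Claim_equal_findMinChars := by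
  intro sw rw0 _
  unfold Spec_findMinChars findMinChars findMinChars_alt
  set s := sw.toList
  set r := rw0.toList
  have hbs : bsearch (fun mid => isSubseq (r.take mid) s) 0 r.length = aLoop s r := by
    refine bsearch_eq _ (aLoop s r) r.length 0 r.length (by omega) (Nat.zero_le _)
      (aLoop_le s r) ?_
    intro k _ hk2
    rw [isSubseq_iff]
    constructor
    · exact fun h => aLoop_max s r k hk2 h
    · exact fun h => take_sublist_of_le h (aLoop_achieves s r)
  simp [hbs]
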